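-- pv_equiv track=rewrite | github.com/boun-tabi-lifelu/puffin | src/utils/cluster_utils.py | sequence_to_dict
-- ===== SOURCE A (Python) =====
-- from itertools import groupby
--
-- def format_positions(positions, min_length=1):
--     """
--     Format positions into ranges based on groupings.
--
--     Parameters:
--         positions (list): List of positions to format.
--         min_length (int): Minimum range length to include.
--
--     Returns:
--         list: List of formatted ranges.
--     """
--     ranges = []
--     for k, g in groupby(enumerate(positions), lambda i: i[0] - i[1]):
--         group = list(map(lambda x: x[1] + 1, g))  # Adding 1 for 1-based index
--         if len(group) < min_length:
--             continue
--         if len(group) == 1: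
--             ranges.append(str(group[0]))
--         else:
--             ranges.append(f"{group[0]}-{group[-1]}")
--     return '+'.join(ranges)
--
-- def sequence_to_dict(sequence, min_length=1):
--     """
--     Create a dictionary where keys are unique elements in the sequence,
--     and values are formatted position lists.
--
--     Parameters:
--         sequence (list): Input sequence.
--         min_length (int): Minimum segment length to include in the result.
--
--     Returns:
--         dict: Dictionary with formatted positions for each unique element.
--     """
--     pos_dict = {}
--     for index, value in enumerate(sequence):
--         pos_dict.setdefault(value, []).append(index)
--
--     # Format positions and filter clusters
--     result_dict = {
--         str(key): format_positions(value, min_length)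
--         for key, value in pos_dict.items()
--     }
--     return {cluster: pos for cluster, pos in result_dict.items() if pos != ''}
-- ===== SOURCE B (Python) =====
-- def format_positions(positions, min_length=1):
--     """Set-based boundary detection instead of sequential grouping: a
--     position starts a run iff its predecessor is absent from the position
--     set, and ends one iff its successor is absent; zipping the starts with
--     the ends yields the runs, which are then formatted."""
--     present = set(positions)
--     starts = [p for p in positions if p - 1 not in present]
--     ends = [p for p in positions if p + 1 not in present]
--     parts = []
--     for s, e in zip(starts, ends):
--         if e - s + 1 < min_length:
--             continue
--         parts.append(str(s + 1) if s == e else f"{s + 1}-{e + 1}")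
--     return '+'.join(parts)
--
--
-- def sequence_to_dict(sequence, min_length=1):
--     pos_dict = {}
--     for index, value in enumerate(sequence):
--         pos_dict.setdefault(value, []).append(index)
--     result_dict = {
--         str(key): format_positions(value, min_length)
--         for key, value in pos_dict.items()
--     }
--     return {cluster: pos for cluster, pos in result_dict.items() if pos != ''}
-- ===== Notes on version B (the rewrite author's own statement) =====
-- stated objective: alternative
-- what changed: Run detection is no longer sequential: A's groupby over (index, position) with the i-p key and intermediate group lists is replaced by set-membership boundary detection — build the set of positions, a position starts a run iff p-1 is absent and ends one iff p+1 is absent, zip the starts with the ends and format each pair; correct because each bucket's position list is strictly increasing.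
import Mathlib
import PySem

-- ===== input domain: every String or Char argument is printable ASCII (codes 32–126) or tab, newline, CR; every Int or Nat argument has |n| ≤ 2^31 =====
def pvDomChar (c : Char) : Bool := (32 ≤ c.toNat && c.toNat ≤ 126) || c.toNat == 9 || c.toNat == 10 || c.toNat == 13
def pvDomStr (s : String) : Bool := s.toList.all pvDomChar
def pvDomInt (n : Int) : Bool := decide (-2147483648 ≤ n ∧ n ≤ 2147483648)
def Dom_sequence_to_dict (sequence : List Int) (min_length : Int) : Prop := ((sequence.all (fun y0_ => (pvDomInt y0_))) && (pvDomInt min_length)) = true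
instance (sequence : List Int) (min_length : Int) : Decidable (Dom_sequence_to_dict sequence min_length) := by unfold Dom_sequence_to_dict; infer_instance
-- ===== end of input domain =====

-- B replaces A's sequential groupby run-grouping by set-membership boundary detection
-- (a position starts a run iff p-1 is absent from the position set, ends one iff p+1 is
-- absent; starts zipped with ends give the runs); same cost, a different algorithm.

-- ===== PORT A =====

-- itertools.groupby key: lambda i: i[0] - i[1]
def fpKey (p : Int × Int) : Int := p.1 - p.2

-- itertools.groupby(·, fpKey): maximal runs of adjacent elements with equal key;
-- cur is the current group, accumulated in reverse.
def pyGroupbyGo (cur : List (Int × Int)) : List (Int × Int) → List (List (Int × Int))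
  | [] => [cur.reverse]
  | y :: ys =>
    if fpKey (cur.headD (0, 0)) = fpKey y then pyGroupbyGo (y :: cur) ys
    else cur.reverse :: pyGroupbyGo [y] ys

def pyGroupby : List (Int × Int) → List (List (Int × Int))
  | [] => []
  | x :: xs => pyGroupbyGo [x] xs

def format_positions (positions : List Int) (min_length : Int) : String :=
  let ranges := (pyGroupby (PySem.List.enumerate positions 0)).foldl
    (fun acc g =>
      let group := g.map (fun x => x.2 + 1)
      if (group.length : Int) < min_length then acc
      else if group.length = 1 then acc ++ [PySem.Int.toStr (group.headD 0)]
      else acc ++ [PySem.Int.toStr (group.headD 0) ++ "-" ++ PySem.Int.toStr (group.getLastD 0)])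
    []
  PySem.Str.join "+" ranges

def sequence_to_dict (sequence : List Int) (min_length : Int) : List (String × String) :=
  let pos_dict : PySem.Dict Int (List Int) :=
    (PySem.List.enumerate sequence 0).foldl (fun d p => d.modify p.2 [] (· ++ [p.1])) PySem.Dict.empty
  let result_dict : PySem.Dict String String :=
    pos_dict.items.foldl
      (fun d kv => d.insert (PySem.Int.toStr kv.1) (format_positions kv.2 min_length)) PySem.Dict.empty
  result_dict.items.filter (fun cp => cp.2 != "")

-- ===== PORT B =====

def format_positions_alt (positions : List Int) (min_length : Int) : String :=
  let present : PySem.Set Int := PySem.Set.ofList positions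
  let starts := positions.filter (fun p => !(PySem.Set.contains present (p - 1)))
  let ends := positions.filter (fun p => !(PySem.Set.contains present (p + 1)))
  let parts := (starts.zip ends).foldl
    (fun acc se =>
      if se.2 - se.1 + 1 < min_length then acc
      else if se.1 = se.2 then acc ++ [PySem.Int.toStr (se.1 + 1)]
      else acc ++ [PySem.Int.toStr (se.1 + 1) ++ "-" ++ PySem.Int.toStr (se.2 + 1)])
    []
  PySem.Str.join "+" parts

def sequence_to_dict_alt (sequence : List Int) (min_length : Int) : List (String × String) :=
  let pos_dict : PySem.Dict Int (List Int) :=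
    (PySem.List.enumerate sequence 0).foldl (fun d p => d.modify p.2 [] (· ++ [p.1])) PySem.Dict.empty
  let result_dict : PySem.Dict String String :=
    pos_dict.items.foldl
      (fun d kv => d.insert (PySem.Int.toStr kv.1) (format_positions_alt kv.2 min_length)) PySem.Dict.empty
  result_dict.items.filter (fun cp => cp.2 != "")

-- ===== PRECONDITION & SPEC =====
def Spec_sequence_to_dict (sequence : List Int) (min_length : Int) (out : List (String × String)) : Prop := out = sequence_to_dict_alt sequence min_length
instance (sequence : List Int) (min_length : Int) (out : List (String × String)) : Decidable (Spec_sequence_to_dict sequence min_length out) := by unfold Spec_sequence_to_dict; infer_instance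

-- ===== CLAIM (what is proved, stated in full; the proofs are below) =====
def Claim_equal_sequence_to_dict : Prop := ∀ (sequence : List Int) (min_length : Int), Dom_sequence_to_dict sequence min_length → Spec_sequence_to_dict sequence min_length (sequence_to_dict sequence min_length)

-- ===== LEMMAS AND PROOFS =====

-- the maximal consecutive runs of a position list, as (start, prev) pairs
def runsFrom : Int → Int → List Int → List (Int × Int)
  | s, p, [] => [(s, p)]
  | s, p, q :: rest => if q = p + 1 then runsFrom s q rest else (s, p) :: runsFrom q q rest

-- formatting of one finished run [start..prev] (reference step both sides reduce to)
def flushRun (ranges : List String) (start prev min_length : Int) : List String :=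
  let n := prev - start + 1
  if n < min_length then ranges
  else if n = 1 then ranges ++ [PySem.Int.toStr (start + 1)]
  else ranges ++ [PySem.Int.toStr (start + 1) ++ "-" ++ PySem.Int.toStr (prev + 1)]

-- the reversed current group of A's groupby: pairs (i, p), (i-1, p-1), …, (i-n, p-n)
def revRunPair : Int → Int → Nat → List (Int × Int)
  | i, p, 0 => [(i, p)]
  | i, p, n+1 => (i, p) :: revRunPair (i-1) (p-1) n

-- ascending run a, a+1, …, a+n (the one-based mapped group)
def upRun : Int → Nat → List Int
  | a, 0 => [a]
  | a, n+1 => a :: upRun (a+1) n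

-- A's per-group formatting step
def fStep (m : Int) (acc : List String) (g : List (Int × Int)) : List String :=
  let group := g.map (fun x => x.2 + 1)
  if (group.length : Int) < m then acc
  else if group.length = 1 then acc ++ [PySem.Int.toStr (group.headD 0)]
  else acc ++ [PySem.Int.toStr (group.headD 0) ++ "-" ++ PySem.Int.toStr (group.getLastD 0)]

theorem upRun_append (a : Int) (n : Nat) : upRun a n ++ [a + (n + 1)] = upRun a (n + 1) := by
  induction n generalizing a with
  | zero => show [a] ++ [a + ((0:Nat) + 1)] = [a, a + 1]; norm_num
  | succ k ih =>
    show (a :: upRun (a+1) k) ++ [a + ((k+1:Nat) + 1)] = a :: upRun (a+1) (k+1)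
    rw [List.cons_append]
    have e : (a + (((k+1:Nat):Int) + 1)) = (a + 1) + (((k:Nat):Int) + 1) := by push_cast; ring
    rw [e, ih]

theorem map_reverse_revRunPair (j p : Int) (n : Nat) :
    ((revRunPair j p n).reverse).map (fun x : Int × Int => x.2 + 1) = upRun (p - n + 1) n := by
  induction n generalizing j p with
  | zero => simp [revRunPair, upRun]
  | succ k ih =>
    show ((((j, p) :: revRunPair (j-1) (p-1) k)).reverse).map (fun x : Int × Int => x.2 + 1)
        = upRun (p - (k+1) + 1) (k+1)
    rw [List.reverse_cons, List.map_append, ih]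
    simp only [List.map_cons, List.map_nil]
    have h1 : p - 1 - k + 1 = p - (k+1) + 1 := by omega
    have h2 : (p + 1 : Int) = (p - (k+1) + 1) + (k + 1) := by omega
    rw [h1, h2, upRun_append]

theorem length_upRun (a : Int) (n : Nat) : (upRun a n).length = n + 1 := by
  induction n generalizing a with
  | zero => rfl
  | succ k ih => simp [upRun, ih]

theorem headD_upRun (a : Int) (n : Nat) (d : Int) : (upRun a n).headD d = a := by
  cases n <;> rfl

theorem getLastD_upRun (a : Int) (n : Nat) (d : Int) : (upRun a n).getLastD d = a + n := by
  induction n generalizing a d with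
  | zero => simp [upRun]
  | succ k ih =>
    show (a :: upRun (a+1) k).getLastD d = a + (k+1)
    rw [List.getLastD_cons, ih]
    ring

theorem fStep_revRunPair (m : Int) (acc : List String) (j p : Int) (n : Nat) :
    fStep m acc ((revRunPair j p n).reverse) = flushRun acc (p - n) p m := by
  unfold fStep flushRun
  rw [map_reverse_revRunPair]
  simp only [length_upRun, headD_upRun, getLastD_upRun]
  have e2 : p - (n : Int) + 1 + (n : Int) = p + 1 := by ring
  rw [e2]
  have e1 : ((((n+1 : Nat)) : Int) < m) = (p - (p - (n:Int)) + 1 < m) := by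
    apply propext; push_cast; constructor <;> intro h <;> omega
  have e3 : ((n + 1 = 1)) = (p - (p - (n:Int)) + 1 = 1) := by
    apply propext; constructor <;> intro h <;> omega
  simp only [e1, e3]

theorem headD_revRunPair (j p : Int) (n : Nat) (d : Int × Int) :
    (revRunPair j p n).headD d = (j, p) := by
  cases n <;> rfl

-- A's grouping-and-formatting fold equals the flush fold over the consecutive runs
theorem groupby_fold_eq_runs (m : Int) (ys : List Int) :
    ∀ (i p : Int) (n : Nat) (acc : List String),
    (pyGroupbyGo (revRunPair (i-1) p n) (PySem.List.enumerate ys i)).foldl (fStep m) acc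
      = (runsFrom (p - n) p ys).foldl (fun acc r => flushRun acc r.1 r.2 m) acc := by
  induction ys with
  | nil =>
    intro i p n acc
    simp only [PySem.List.enumerate_nil, pyGroupbyGo, runsFrom, List.foldl_cons, List.foldl_nil]
    exact fStep_revRunPair m acc (i-1) p n
  | cons y ys ih =>
    intro i p n acc
    rw [PySem.List.enumerate_cons]
    show (pyGroupbyGo (revRunPair (i-1) p n) ((i, y) :: PySem.List.enumerate ys (i+1))).foldl (fStep m) acc = _
    unfold pyGroupbyGo
    rw [headD_revRunPair]
    by_cases hy : y = p + 1
    · rw [if_pos (by simp [fpKey]; omega)]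
      have hcur : (i, y) :: revRunPair (i-1) p n = revRunPair ((i+1)-1) (p+1) (n+1) := by
        subst hy
        show (i, p+1) :: revRunPair (i-1) p n = (i+1-1, p+1) :: revRunPair (i+1-1-1) (p+1-1) n
        norm_num
      rw [hcur, ih (i+1) (p+1) (n+1)]
      have hcast : p + 1 - (((n+1 : Nat)) : Int) = p - n := by push_cast; omega
      rw [hcast]
      have hruns : runsFrom (p - (n:Int)) p (y :: ys) = runsFrom (p - (n:Int)) (p+1) ys := by
        show (if y = p + 1 then runsFrom (p - (n:Int)) y ys else (p - (n:Int), p) :: runsFrom y y ys) = _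
        rw [if_pos hy, hy]
      rw [hruns]
    · rw [if_neg (by simp [fpKey]; omega)]
      rw [List.foldl_cons]
      have hone : [(i, y)] = revRunPair ((i+1)-1) y 0 := by
        show [(i,y)] = [(i+1-1, y)]; norm_num
      rw [hone, ih (i+1) y 0, fStep_revRunPair]
      have hruns : runsFrom (p - (n:Int)) p (y :: ys) = (p - (n:Int), p) :: runsFrom y y ys := by
        show (if y = p + 1 then _ else ((p - (n:Int), p) :: runsFrom y y ys)) = _
        rw [if_neg hy]
      rw [hruns, List.foldl_cons]
      norm_num

-- B-side: run starts / run ends read off adjacent elements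
def startsAdj : Int → List Int → List Int
  | _, [] => []
  | r, q :: t => if q = r + 1 then startsAdj q t else q :: startsAdj q t

def endsAdj : Int → List Int → List Int
  | r, [] => [r]
  | r, q :: t => if q = r + 1 then endsAdj q t else r :: endsAdj q t

theorem zip_adj_eq_runs (rest : List Int) : ∀ (s p : Int),
    (s :: startsAdj p rest).zip (endsAdj p rest) = runsFrom s p rest := by
  induction rest with
  | nil => intro s p; rfl
  | cons q t ih =>
    intro s p
    show (s :: startsAdj p (q :: t)).zip (endsAdj p (q :: t)) = runsFrom s p (q :: t)
    unfold startsAdj endsAdj runsFrom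
    by_cases hq : q = p + 1
    · simp only [if_pos hq]; exact ih s q
    · simp only [if_neg hq, List.zip_cons_cons]
      rw [ih q q]

-- membership of q-1 in the sorted context: only the immediate predecessor can provide it
theorem filter_starts (rest : List Int) : ∀ (pre : List Int) (r : Int),
    List.Pairwise (· < ·) (pre ++ r :: rest) →
    rest.filter (fun q => !decide ((q - 1) ∈ pre ++ r :: rest)) = startsAdj r rest := by
  induction rest with
  | nil => intro pre r _; rfl
  | cons q t ih =>
    intro pre r h
    have hfacts := h
    rw [List.pairwise_append] at hfacts
    obtain ⟨-, hcons, hcross⟩ := hfacts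
    rw [List.pairwise_cons] at hcons
    obtain ⟨hrlt, hcons2⟩ := hcons
    have hrq : r < q := hrlt q (by simp)
    have hmem : ((q - 1) ∈ pre ++ r :: q :: t) ↔ q = r + 1 := by
      constructor
      · intro hm
        rcases List.mem_append.mp hm with hp | hc
        · have := hcross _ hp r (by simp); omega
        · rw [List.mem_cons] at hc
          rcases hc with hc | hc
          · omega
          · rw [List.mem_cons] at hc
            rcases hc with hc | hc
            · omega
            · have : q < q - 1 := (List.pairwise_cons.mp hcons2).1 _ hc; omega
      · intro hq; apply List.mem_append.mpr; right; simp; omega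
    have hre : (pre ++ [r]) ++ q :: t = pre ++ r :: q :: t := by simp
    have h' : List.Pairwise (· < ·) ((pre ++ [r]) ++ q :: t) := by rw [hre]; exact h
    have iht := ih (pre ++ [r]) q h'
    rw [hre] at iht
    by_cases hq : q = r + 1
    · rw [List.filter_cons_of_neg (by simp [hq])]
      show _ = startsAdj r (q :: t)
      unfold startsAdj; rw [if_pos hq]; exact iht
    · rw [List.filter_cons_of_pos (by simp [hmem, hq])]
      show _ = startsAdj r (q :: t)
      unfold startsAdj; rw [if_neg hq, iht]

theorem filter_ends (rest : List Int) : ∀ (pre : List Int) (r : Int),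
    List.Pairwise (· < ·) (pre ++ r :: rest) →
    (r :: rest).filter (fun q => !decide ((q + 1) ∈ pre ++ r :: rest)) = endsAdj r rest := by
  induction rest with
  | nil =>
    intro pre r h
    rw [List.pairwise_append] at h
    obtain ⟨-, -, hcross⟩ := h
    have hmem : ¬ ((r + 1) ∈ pre ++ [r]) := by
      intro hm
      rcases List.mem_append.mp hm with hp | hc
      · have := hcross _ hp r (by simp); omega
      · simp at hc
    rw [List.filter_cons_of_pos (by simp [hmem]), List.filter_nil]
    rfl
  | cons q t ih =>
    intro pre r h
    have hfacts := h
    rw [List.pairwise_append] at hfacts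
    obtain ⟨-, hcons, hcross⟩ := hfacts
    rw [List.pairwise_cons] at hcons
    obtain ⟨hrlt, hcons2⟩ := hcons
    have hrq : r < q := hrlt q (by simp)
    have hmem : ((r + 1) ∈ pre ++ r :: q :: t) ↔ q = r + 1 := by
      constructor
      · intro hm
        rcases List.mem_append.mp hm with hp | hc
        · have := hcross _ hp r (by simp); omega
        · rw [List.mem_cons] at hc
          rcases hc with hc | hc
          · omega
          · rw [List.mem_cons] at hc
            rcases hc with hc | hc
            · omega
            · have hq1 : q < r + 1 := (List.pairwise_cons.mp hcons2).1 _ hc; omega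
      · intro hq; apply List.mem_append.mpr; right; simp; omega
    have hre : (pre ++ [r]) ++ q :: t = pre ++ r :: q :: t := by simp
    have h' : List.Pairwise (· < ·) ((pre ++ [r]) ++ q :: t) := by rw [hre]; exact h
    have iht := ih (pre ++ [r]) q h'
    rw [hre] at iht
    by_cases hq : q = r + 1
    · rw [List.filter_cons_of_neg (by simp [hq])]
      show _ = endsAdj r (q :: t)
      unfold endsAdj; rw [if_pos hq]; exact iht
    · rw [List.filter_cons_of_pos (by simp [hmem, hq])]
      show _ = endsAdj r (q :: t)
      unfold endsAdj; rw [if_neg hq, iht]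

theorem contains_ofList_eq (xs : List Int) (y : Int) :
    PySem.Set.contains (PySem.Set.ofList xs) y = decide (y ∈ xs) := by
  simp [pysem]

-- B's per-pair step is the reference flush step
theorem pairStep_eq_flushRun (m : Int) :
    (fun (acc : List String) (se : Int × Int) =>
      if se.2 - se.1 + 1 < m then acc
      else if se.1 = se.2 then acc ++ [PySem.Int.toStr (se.1 + 1)]
      else acc ++ [PySem.Int.toStr (se.1 + 1) ++ "-" ++ PySem.Int.toStr (se.2 + 1)])
    = fun acc se => flushRun acc se.1 se.2 m := by
  funext acc se
  unfold flushRun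
  have e : (se.1 = se.2) = (se.2 - se.1 + 1 = 1) := by
    apply propext; constructor <;> intro h <;> omega
  simp only [e]

theorem format_positions_eq (positions : List Int) (m : Int)
    (hps : List.Pairwise (· < ·) positions) :
    format_positions positions m = format_positions_alt positions m := by
  cases positions with
  | nil => rfl
  | cons x rest =>
    unfold format_positions format_positions_alt
    -- A side
    have hA : pyGroupby (PySem.List.enumerate (x :: rest) 0) = pyGroupbyGo (revRunPair (1-1) x 0) (PySem.List.enumerate rest 1) := by
      rw [PySem.List.enumerate_cons]
      show pyGroupbyGo [(0, x)] (PySem.List.enumerate rest (0+1)) = _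
      norm_num [revRunPair]
    rw [hA]
    have hfold := groupby_fold_eq_runs m rest 1 x 0 []
    simp only [show ((x : Int) - (0 : Nat)) = x by norm_num] at hfold
    show PySem.Str.join "+" ((pyGroupbyGo (revRunPair (1-1) x 0) (PySem.List.enumerate rest 1)).foldl (fStep m) []) = _
    rw [hfold]
    -- B side
    have hset : ∀ y : Int, PySem.Set.contains (PySem.Set.ofList (x :: rest)) y = decide (y ∈ x :: rest) :=
      contains_ofList_eq (x :: rest)
    have hpair : List.Pairwise (· < ·) ([] ++ x :: rest) := by simpa using hps
    have hstarts : (x :: rest).filter (fun q => !decide ((q - 1) ∈ x :: rest)) = x :: startsAdj x rest := by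
      have hhead : ¬ ((x - 1) ∈ x :: rest) := by
        intro hm
        rw [List.mem_cons] at hm
        rcases hm with hm | hm
        · omega
        · have := (List.pairwise_cons.mp hps).1 _ hm; omega
      rw [List.filter_cons_of_pos (by simp [hhead])]
      have := filter_starts rest [] x hpair
      simpa using this
    have hends : (x :: rest).filter (fun q => !decide ((q + 1) ∈ x :: rest)) = endsAdj x rest := by
      have := filter_ends rest [] x hpair
      simpa using this
    show _ = PySem.Str.join "+"
      ((((x :: rest).filter (fun p => !(PySem.Set.contains (PySem.Set.ofList (x :: rest)) (p - 1)))).zip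
        ((x :: rest).filter (fun p => !(PySem.Set.contains (PySem.Set.ofList (x :: rest)) (p + 1))))).foldl
        (fun acc se =>
          if se.2 - se.1 + 1 < m then acc
          else if se.1 = se.2 then acc ++ [PySem.Int.toStr (se.1 + 1)]
          else acc ++ [PySem.Int.toStr (se.1 + 1) ++ "-" ++ PySem.Int.toStr (se.2 + 1)]) [])
    simp only [hset]
    rw [hstarts, hends, zip_adj_eq_runs, pairStep_eq_flushRun]

-- each bucket of pos_dict is the (strictly increasing) list of indices of its key
theorem bucket_pairwise (sequence : List Int) (kv : Int × List Int)
    (hmem : kv ∈ ((PySem.List.enumerate sequence 0).foldl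
      (fun d p => d.modify p.2 [] (· ++ [p.1])) PySem.Dict.empty).items) :
    List.Pairwise (· < ·) kv.2 := by
  set l := PySem.List.enumerate sequence 0 with hl
  set d := l.foldl (fun d p => d.modify p.2 [] (· ++ [p.1])) PySem.Dict.empty with hd
  have hnodup : d.keys.Nodup := by
    rw [hd]
    exact PySem.Dict.nodup_keys_foldl_modify_key l (fun p => p.2) [] (fun _ p => (· ++ [p.1]))
      PySem.Dict.empty (by simp [PySem.Dict.keys_empty])
  have hget : d.getD kv.1 [] = kv.2 := by
    rcases kv with ⟨k, v⟩
    exact PySem.Dict.getD_of_mem_items d hmem hnodup []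
  have hswap : d = (l.map (fun p => (p.2, p.1))).foldl
      (fun d p => d.modify p.1 [] (· ++ [p.2])) PySem.Dict.empty := by
    rw [hd, List.foldl_map]
  have hval : kv.2 = ((l.map (fun p => (p.2, p.1))).filter (fun p => p.1 == kv.1)).map (·.2) := by
    rw [← hget, hswap, PySem.Dict.getD_foldl_modify_append]
    simp [PySem.Dict.getD_empty]
  have hval2 : kv.2 = (l.filter (fun p => p.2 == kv.1)).map (fun p => p.1) := by
    rw [hval, List.filter_map, List.map_map]
    rfl
  rw [hval2, List.pairwise_map]
  exact List.Pairwise.filter _ (by simpa using PySem.List.pairwise_lt_enumerate sequence 0)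

-- ===== VERDICT (by name: the statement is the Claim_ definition above) =====
theorem sequence_to_dict_spec : Claim_equal_sequence_to_dict := by
  intro sequence min_length _
  unfold Spec_sequence_to_dict sequence_to_dict sequence_to_dict_alt
  dsimp only
  have hstep : ∀ (acc : PySem.Dict String String),
      ∀ kv ∈ ((PySem.List.enumerate sequence 0).foldl
        (fun d p => d.modify p.2 [] (· ++ [p.1])) PySem.Dict.empty).items,
      acc.insert (PySem.Int.toStr kv.1) (format_positions kv.2 min_length)
        = acc.insert (PySem.Int.toStr kv.1) (format_positions_alt kv.2 min_length) := by
    intro acc kv hkv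
    rw [format_positions_eq kv.2 min_length (bucket_pairwise sequence kv hkv)]
  rw [PySem.List.foldl_congr_mem _ _ _ _ hstep]
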